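-- pv_equiv track=rewrite | github.com/yedini/Algorithm | 코테대비문제/디펜스게임.py | solution
-- ===== SOURCE A (Python) =====
-- from heapq import heappop, heappush
--
-- def solution(n, k, enemy):
--     answer = 0
--     sum_e = 0
--     heap = []
--
--     for e in enemy:
--         heappush(heap, -e)  # heappush는 최소힙이므로, -를 붙여 최대힙으로 사용함
--         sum_e += e   # 적의 전체 수에 현재 적의 수 e를 누적으로 더함
--         if sum_e > n: # 적의 전체 수가 병사 수 n보다 많을 경우
--             if k == 0:  # 무적권도 존재하지 않을 경우 더이상 진행 x
--                 break
--             # 지금까지 추가한 수 중 가장 큰 원소값만큼 sum에서 빼고, k도 차감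
--             sum_e += heappop(heap)
--             k -= 1
--         answer += 1
--
--     return answer
-- ===== SOURCE B (Python) =====
-- def solution(n, k, enemy):
--     # Binary search for the largest m such that the first m waves are survivable:
--     # survivable(m) <=> sum of prefix m with its min(k, m) largest waves removed is <= n.
--     def feasible(m):
--         keep = sorted(enemy[:m])[:max(m - k, 0)]
--         return sum(keep) <= n
--     lo, hi = 0, len(enemy)
--     while lo < hi:
--         mid = (lo + hi + 1) // 2
--         if feasible(mid):
--             lo = mid
--         else:
--             hi = mid - 1
--     return lo
-- ===== Notes on version B (the rewrite author's own statement) =====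
-- stated objective: alternative
-- what changed: Replaces the stateful max-heap greedy simulation with a feasibility predicate (prefix sum minus its min(k,m) largest waves <= n) plus a binary search for the largest survivable round count m; Pre_ excludes inputs outside the game's natural domain (a negative soldier count, token count or wave size with the greedy still active), where A's bookkeeping is accidental and the feasibility view does not apply.
-- outside the precondition, e.g. on solution(-2, 3, [-3, 4]): A returns 2, B returns 0; on solution(0, -2, [4, 1]): A returns 2, B returns 0; on solution(0, 0, [1, -1, 0]): A returns 0, B returns 3
import Mathlib
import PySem

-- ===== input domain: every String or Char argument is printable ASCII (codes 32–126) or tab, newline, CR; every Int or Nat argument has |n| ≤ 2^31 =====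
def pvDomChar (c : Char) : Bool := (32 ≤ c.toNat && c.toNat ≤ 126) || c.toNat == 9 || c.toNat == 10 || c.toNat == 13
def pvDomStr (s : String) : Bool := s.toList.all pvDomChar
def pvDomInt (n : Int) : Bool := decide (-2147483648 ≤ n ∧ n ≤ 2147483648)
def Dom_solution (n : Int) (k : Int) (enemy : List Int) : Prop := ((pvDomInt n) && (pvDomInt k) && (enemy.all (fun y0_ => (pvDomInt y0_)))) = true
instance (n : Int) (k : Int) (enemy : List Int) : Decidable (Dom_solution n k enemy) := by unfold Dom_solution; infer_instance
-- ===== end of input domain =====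

-- B replaces A's incremental max-heap greedy with a binary search over the answer using a
-- prefix-feasibility predicate; equal on the game's natural domain (nonnegative n, k, waves).

-- ===== PORT A =====
-- heapq's heappush/heappop are library primitives; they are ported by their min-priority-queue
-- contract (push adds an element, pop returns and removes a minimum element), which is exact
-- for everything A observes (the popped values; the heap's internal array layout is never read).
def pyHeapPush (heap : List Int) (x : Int) : List Int := x :: heap

def pyHeapPop (heap : List Int) : Int × List Int :=
  match PySem.List.min? heap (fun x => x) with
  | some m => (m, (PySem.List.remove? heap m).getD heap)
  | none => (0, [])  -- IndexError; A only pops right after a push, so never on an empty heap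

def solutionGo (n : Int) (es : List Int) (answer : Int) (sum_e : Int) (heap : List Int) (k : Int) : Int :=
  match es with
  | [] => answer
  | e :: rest =>
    let heap' := pyHeapPush heap (-e)
    let sum' := sum_e + e
    if sum' > n then
      if k = 0 then answer
      else
        let pr := pyHeapPop heap'
        solutionGo n rest (answer + 1) (sum' + pr.1) pr.2 (k - 1)
    else
      solutionGo n rest (answer + 1) sum' heap' k

def solution (n : Int) (k : Int) (enemy : List Int) : Int :=
  solutionGo n enemy 0 0 [] k

-- ===== PORT B =====
def feasibleB (n : Int) (k : Int) (enemy : List Int) (m : Int) : Bool :=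
  let keep := PySem.List.slice
    (PySem.List.sorted (PySem.List.slice enemy none (some m)) (fun x => x) false)
    none (some (max (m - k) 0))
  decide (keep.sum ≤ n)

def bsLoop (n : Int) (k : Int) (enemy : List Int) (lo hi : Int) : Int :=
  if h : lo < hi then
    let mid := PySem.Int.floordiv (lo + hi + 1) 2
    have hb : lo + 1 ≤ mid ∧ mid ≤ hi := by
      have h2 := PySem.Int.floordiv_two_mid_bounds (lo := lo + 1) (hi := hi) (by omega)
      rw [show lo + 1 + hi = lo + hi + 1 from by ring] at h2
      exact ⟨h2.1, h2.2⟩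
    if feasibleB n k enemy mid then bsLoop n k enemy mid hi
    else bsLoop n k enemy lo (mid - 1)
  else lo
termination_by (hi - lo).toNat
decreasing_by
  · omega
  · omega

def solution_alt (n : Int) (k : Int) (enemy : List Int) : Int :=
  bsLoop n k enemy 0 (PySem.List.len enemy)

-- ===== PRECONDITION & SPEC =====
-- Pre_ admits the game's natural domain (nonnegative soldier count, token count and waves)
-- together with the degenerate inputs whose outcome is forced (no waves, or enough tokens to
-- absorb every round); outside it — negative parameters with the greedy still active — A's
-- bookkeeping (and, for k < 0, the never-taken `k == 0` branch) is accidental behaviour.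
def Pre_solution (n : Int) (k : Int) (enemy : List Int) : Prop :=
  (0 ≤ n ∧ 0 ≤ k ∧ ∀ e ∈ enemy, 0 ≤ e) ∨ (0 ≤ n ∧ (enemy.length : Int) ≤ k) ∨ enemy = [] ∨
    (0 ≤ n ∧ ∀ i ≤ enemy.length, (enemy.take i).sum ≤ n) ∨
    (k = 0 ∧ n < 0 ∧ ∀ e ∈ enemy, 0 ≤ e)
instance (n : Int) (k : Int) (enemy : List Int) : Decidable (Pre_solution n k enemy) := by
  unfold Pre_solution; infer_instance

def pvWitness_solution : Int × Int × List Int := (5, 1, [4, 2, 4, 5])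

def Spec_solution (n : Int) (k : Int) (enemy : List Int) (out : Int) : Prop := out = solution_alt n k enemy
instance (n : Int) (k : Int) (enemy : List Int) (out : Int) : Decidable (Spec_solution n k enemy out) := by unfold Spec_solution; infer_instance

-- ===== CLAIM (what is proved, stated in full; the proofs are below) =====
def Claim_equal_solution : Prop := ∀ (n : Int) (k : Int) (enemy : List Int), Dom_solution n k enemy → Pre_solution n k enemy → Spec_solution n k enemy (solution n k enemy)

-- ===== LEMMAS AND PROOFS =====

-- sorted ascending, identity key (Python's sorted(xs))
def ssort (xs : List Int) : List Int := PySem.List.sorted xs (fun x => x) false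

-- soldiers needed for the rounds xs after deleting the min(k, |xs|) largest waves
def keepSum (k : Int) (xs : List Int) : Int := ((ssort xs).take (xs.length - k.toNat)).sum

def Feas (n k : Int) (xs : List Int) : Prop := keepSum k xs ≤ n

lemma ssort_congr {xs ys : List Int} (h : xs.Perm ys) : ssort xs = ssort ys :=
  PySem.List.sorted_eq_sorted_of_perm xs ys (fun x => x) (fun _ _ hab => hab) h

lemma feas_congr {n k : Int} {xs ys : List Int} (h : xs.Perm ys) :
    Feas n k xs ↔ Feas n k ys := by
  unfold Feas keepSum
  rw [ssort_congr h, h.length_eq]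

lemma ssort_append_of_le {K R : List Int} (h : ∀ a ∈ K, ∀ b ∈ R, a ≤ b) :
    ssort (K ++ R) = ssort K ++ ssort R := by
  apply PySem.List.sorted_id_eq_of_perm_of_pairwise
  · exact List.Perm.append (PySem.List.sorted_perm K _ false) (PySem.List.sorted_perm R _ false)
  · rw [List.pairwise_append]
    refine ⟨by simpa using PySem.List.sorted_pairwise K (fun x => x),
            by simpa using PySem.List.sorted_pairwise R (fun x => x), ?_⟩
    intro a ha b hb
    exact h a ((PySem.List.mem_sorted K _ false a).1 ha) b ((PySem.List.mem_sorted R _ false b).1 hb)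

lemma sum_take_le_sum {xs : List Int} (h : ∀ x ∈ xs, 0 ≤ x) (c : Nat) :
    (xs.take c).sum ≤ xs.sum := by
  have hd : 0 ≤ (xs.drop c).sum :=
    List.sum_nonneg (fun x hx => h x (List.mem_of_mem_drop hx))
  calc (xs.take c).sum ≤ (xs.take c).sum + (xs.drop c).sum := by linarith
    _ = xs.sum := by rw [← List.sum_append, List.take_append_drop]

lemma keepSum_le_of_partition {k : Int} {X K R : List Int}
    (hperm : X.Perm (K ++ R)) (hcross : ∀ a ∈ K, ∀ b ∈ R, a ≤ b)
    (hK : ∀ x ∈ K, 0 ≤ x) (hR : R.length ≤ k.toNat) :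
    keepSum k X ≤ K.sum := by
  unfold keepSum
  have e1 : ssort X = ssort K ++ ssort R :=
    (ssort_congr hperm).trans (ssort_append_of_le hcross)
  have hlen : X.length = K.length + R.length := by
    rw [hperm.length_eq, List.length_append]
  have hc : X.length - k.toNat ≤ K.length := by omega
  rw [e1, List.take_append_of_le_length (by rw [show (ssort K).length = K.length from PySem.List.length_sorted K _ false]; exact hc)]
  have hKs : (ssort K).sum = K.sum := (PySem.List.sorted_perm K _ false).sum_eq
  calc ((ssort K).take (X.length - k.toNat)).sum
      ≤ (ssort K).sum := sum_take_le_sum (fun x hx => hK x ((PySem.List.mem_sorted K _ false x).1 hx)) _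
    _ = K.sum := hKs

lemma keepSum_eq_of_partition {k : Int} {X K R : List Int}
    (hperm : X.Perm (K ++ R)) (hcross : ∀ a ∈ K, ∀ b ∈ R, a ≤ b)
    (hR : R.length = k.toNat) :
    keepSum k X = K.sum := by
  unfold keepSum
  have e1 : ssort X = ssort K ++ ssort R :=
    (ssort_congr hperm).trans (ssort_append_of_le hcross)
  have hlen : X.length = K.length + R.length := by
    rw [hperm.length_eq, List.length_append]
  have hc : X.length - k.toNat = (ssort K).length := by
    rw [show (ssort K).length = K.length from PySem.List.length_sorted K _ false]; omega
  rw [e1, hc, List.take_left]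
  exact (PySem.List.sorted_perm K _ false).sum_eq

lemma feas_of_state {n k0 : Int} {K R : List Int} (hK : ∀ x ∈ K, 0 ≤ x)
    (hcross : ∀ a ∈ K, ∀ b ∈ R, a ≤ b) (hfit : K.sum ≤ n) (hR : R.length ≤ k0.toNat) :
    Feas n k0 (K ++ R) :=
  le_trans (keepSum_le_of_partition (List.Perm.refl _) hcross hK hR) hfit

-- one unfolding step of A's loop
lemma solutionGo_cons (n e : Int) (rest : List Int) (answer sum_e : Int) (heap : List Int) (k : Int) :
    solutionGo n (e :: rest) answer sum_e heap k =
      (if sum_e + e > n then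
        (if k = 0 then answer
         else solutionGo n rest (answer + 1) (sum_e + e + (pyHeapPop (-e :: heap)).1)
                (pyHeapPop (-e :: heap)).2 (k - 1))
       else solutionGo n rest (answer + 1) (sum_e + e) (-e :: heap) k) := rfl

-- the greedy loop invariant: after any prefix, the removed waves R are exactly the largest
-- ones, the heap holds the (negated) kept waves K, and the kept sum fits in n
lemma go_char (n k0 : Int) :
    ∀ (es K R heap : List Int) (answer sum_e kleft : Int),
      (∀ e ∈ es, 0 ≤ e) → (∀ x ∈ K, 0 ≤ x) → (∀ y ∈ R, 0 ≤ y) →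
      heap.Perm (K.map (fun x => -x)) →
      sum_e = K.sum →
      (∀ a ∈ K, ∀ b ∈ R, a ≤ b) →
      sum_e ≤ n →
      (∀ y ∈ R, n < K.sum + y) →
      0 ≤ kleft → (R.length : Int) = k0 - kleft →
      ∃ m : Nat, m ≤ es.length ∧
        solutionGo n es answer sum_e heap kleft = answer + (m : Int) ∧
        Feas n k0 ((K ++ R) ++ es.take m) ∧
        (m = es.length ∨ ¬ Feas n k0 ((K ++ R) ++ es.take (m + 1))) := by
  intro es
  induction es with
  | nil =>
    intro K R heap answer sum_e kleft hes hK hR hperm hsum hcross hfit hbig hkl hRlen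
    refine ⟨0, by simp, by simp [solutionGo], ?_, Or.inl rfl⟩
    simpa using feas_of_state hK hcross (hsum ▸ hfit) (by omega)
  | cons e rest ih =>
    intro K R heap answer sum_e kleft hes hK hR hperm hsum hcross hfit hbig hkl hRlen
    have he0 : 0 ≤ e := hes e (by simp)
    have hrest : ∀ x ∈ rest, 0 ≤ x := fun x hx => hes x (by simp [hx])
    have hRle : R.length ≤ k0.toNat := by omega
    by_cases hov : sum_e + e > n
    · by_cases hkz : kleft = 0
      · -- break: return answer; the prefix including e is infeasible
        have hR0 : R.length = k0.toNat := by omega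
        refine ⟨0, by simp, by rw [solutionGo_cons, if_pos hov, if_pos hkz]; simp, ?_, Or.inr ?_⟩
        · simpa using feas_of_state hK hcross (hsum ▸ hfit) hRle
        · rw [show (e :: rest).take (0 + 1) = [e] from rfl]
          by_cases hall : ∀ y ∈ R, e ≤ y
          · have hperm2 : ((K ++ R) ++ [e]).Perm ((K ++ [e]) ++ R) := by
              refine (List.perm_append_singleton e (K ++ R)).trans ?_
              rw [List.append_assoc]
              exact List.perm_middle.symm
            have hcross2 : ∀ a ∈ K ++ [e], ∀ b ∈ R, a ≤ b := by
              intro a ha b hb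
              rcases List.mem_append.1 ha with h1 | h1
              · exact hcross a h1 b hb
              · simp at h1; exact h1 ▸ hall b hb
            intro hF
            unfold Feas at hF
            rw [keepSum_eq_of_partition hperm2 hcross2 hR0] at hF
            simp at hF
            rw [hsum] at hov; linarith
          · push Not at hall
            obtain ⟨y1, hy1R, hy1lt⟩ := hall
            cases hminR : PySem.List.min? R (fun x => x) with
            | none =>
              exact absurd ((PySem.List.min?_eq_none_iff R _).1 hminR)
                (by intro h; rw [h] at hy1R; simp at hy1R)
            | some y0 =>
              have hy0R : y0 ∈ R := PySem.List.min?_mem hminR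
              have hy0min : ∀ y ∈ R, y0 ≤ y := PySem.List.min?_isMin hminR
              have hy0e : y0 < e := lt_of_le_of_lt (hy0min y1 hy1R) hy1lt
              have hperm2 : ((K ++ R) ++ [e]).Perm ((K ++ [y0]) ++ (e :: R.erase y0)) := by
                refine (List.perm_append_singleton e (K ++ R)).trans ?_
                refine List.Perm.trans ?_ (List.perm_middle).symm
                refine List.Perm.cons e ?_
                rw [List.append_assoc]
                exact List.Perm.append_left K ((List.perm_cons_erase hy0R).trans (List.Perm.refl _))
              have hcross2 : ∀ a ∈ K ++ [y0], ∀ b ∈ e :: R.erase y0, a ≤ b := by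
                intro a ha b hb
                have hay0 : a ≤ y0 := by
                  rcases List.mem_append.1 ha with h1 | h1
                  · exact hcross a h1 y0 hy0R
                  · simp at h1; omega
                rcases List.mem_cons.1 hb with h2 | h2
                · omega
                · exact le_trans hay0 (hy0min b (List.mem_of_mem_erase h2))
              have hlen2 : (e :: R.erase y0).length = k0.toNat := by
                simp [List.length_erase_of_mem hy0R]
                have : 1 ≤ R.length := List.length_pos_of_mem hy0R
                omega
              intro hF
              unfold Feas at hF
              rw [keepSum_eq_of_partition hperm2 hcross2 hlen2] at hF
              simp at hF
              have := hbig y0 hy0R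
              linarith
      · -- pop: remove the largest wave seen so far
        have hperm' : (-e :: heap).Perm ((e :: K).map (fun x => -x)) := List.Perm.cons _ hperm
        cases hmin : PySem.List.min? (-e :: heap) (fun x => x) with
        | none => exact absurd ((PySem.List.min?_eq_none_iff _ _).1 hmin) (by simp)
        | some p =>
          have hpmem : p ∈ -e :: heap := PySem.List.min?_mem hmin
          have hpmin : ∀ y ∈ -e :: heap, p ≤ y := PySem.List.min?_isMin hmin
          obtain ⟨M0, hM0mem, hM0eq⟩ : ∃ M0 ∈ e :: K, -M0 = p := by
            rcases List.mem_map.1 (hperm'.subset hpmem) with ⟨x, hx, hxe⟩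
            exact ⟨x, hx, hxe⟩
          have hM0max : ∀ x ∈ e :: K, x ≤ M0 := by
            intro x hx
            have hmemx : -x ∈ -e :: heap := hperm'.symm.subset (by
              simp only [List.mem_map]
              exact ⟨x, hx, rfl⟩)
            have := hpmin (-x) hmemx
            omega
          have hpop : pyHeapPop (-e :: heap) = (p, (-e :: heap).erase p) := by
            unfold pyHeapPop
            rw [hmin]
            show (p, (PySem.List.remove? (-e :: heap) p).getD (-e :: heap)) = _
            rw [PySem.List.remove?_eq_some_erase _ p hpmem]
            rfl
          set K' : List Int := (e :: K).erase M0 with hK'def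
          have hpermc : (e :: K).Perm (M0 :: K') := List.perm_cons_erase hM0mem
          have hsumc : e + K.sum = M0 + K'.sum := by
            have := hpermc.sum_eq; simpa using this
          have hsubK' : ∀ x ∈ K', x ∈ e :: K := fun x hx => List.mem_of_mem_erase hx
          have hK'nn : ∀ x ∈ K', 0 ≤ x := by
            intro x hx
            rcases List.mem_cons.1 (hsubK' x hx) with h1 | h1
            · omega
            · exact hK x h1
          have heM0 : e ≤ M0 := hM0max e (by simp)
          have hM0nn : 0 ≤ M0 := le_trans he0 heM0
          -- the popped wave is at least every remaining one and at least e
          have hM0e_of_small : ∀ y ∈ R, y < e → M0 = e := by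
            intro y hy hye
            rcases List.mem_cons.1 hM0mem with h1 | h1
            · exact h1
            · have := hcross M0 h1 y hy; omega
          have hcross' : ∀ a ∈ K', ∀ b ∈ M0 :: R, a ≤ b := by
            intro a ha b hb
            rcases List.mem_cons.1 hb with h2 | h2
            · exact h2 ▸ hM0max a (hsubK' a ha)
            · rcases List.mem_cons.1 (hsubK' a ha) with h1 | h1
              · -- a is (the value) e: need e ≤ b
                by_cases hbe : e ≤ b
                · omega
                · have hM0e : M0 = e := hM0e_of_small b h2 (by omega)
                  have hK'K : K' = K := by rw [hK'def, hM0e, List.erase_cons_head]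
                  rw [hK'K] at ha
                  exact hcross a ha b h2
              · exact hcross a h1 b h2
          have hbig' : ∀ y ∈ M0 :: R, n < K'.sum + y := by
            intro y hy
            rw [hsum] at hov
            rcases List.mem_cons.1 hy with h2 | h2
            · subst h2; linarith [hsumc]
            · by_cases hye : y < e
              · have hM0e : M0 = e := hM0e_of_small y h2 hye
                subst hM0e
                have := hbig y h2
                linarith [hsumc]
              · have hM0y : M0 ≤ y := by
                  rcases List.mem_cons.1 hM0mem with h1 | h1
                  · omega
                  · exact hcross M0 h1 y h2
                linarith [hsumc]
          have hheap2 : ((-e :: heap).erase p).Perm (K'.map (fun x => -x)) := by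
            refine (List.Perm.erase p hperm').trans ?_
            rw [← hM0eq, ← List.map_erase (fun a b h => neg_inj.mp h : Function.Injective (fun x : Int => -x))]
          have hRnn' : ∀ y ∈ M0 :: R, 0 ≤ y := by
            intro y hy
            rcases List.mem_cons.1 hy with h1 | h1
            · subst h1; exact hM0nn
            · exact hR y h1
          have hsumeq' : sum_e + e + p = K'.sum := by
            rw [hsum]; linarith [hsumc]
          have hfit' : K'.sum ≤ n := by
            rw [hsum] at hfit; linarith [hsumc]
          have hlen' : ((M0 :: R).length : Int) = k0 - (kleft - 1) := by
            simp only [List.length_cons]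
            push_cast
            omega
          have hrec := ih K' (M0 :: R) ((-e :: heap).erase p) (answer + 1) (sum_e + e + p) (kleft - 1)
            hrest hK'nn hRnn' hheap2 hsumeq' hcross'
            (show sum_e + e + p ≤ n by rw [hsumeq']; exact hfit')
            (show ∀ y ∈ M0 :: R, n < K'.sum + y from hbig') (by omega) hlen' 
          obtain ⟨m', hle', heq', hfeas', hbd'⟩ := hrec
          have hbase : (K' ++ M0 :: R).Perm (e :: (K ++ R)) := by
            have h2 : (K' ++ [M0]).Perm (e :: K) :=
              (List.perm_append_singleton M0 K').trans hpermc.symm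
            have h3 := List.Perm.append_right R h2
            rw [List.append_assoc] at h3
            exact h3
          have hpermfix : ∀ tail : List Int,
              ((K' ++ M0 :: R) ++ tail).Perm ((K ++ R) ++ (e :: tail)) := by
            intro tail
            exact (List.Perm.append_right tail hbase).trans
              (List.perm_middle (a := e) (l₁ := K ++ R) (l₂ := tail)).symm
          refine ⟨m' + 1, by simpa using hle', ?_, ?_, ?_⟩
          · rw [solutionGo_cons, if_pos hov, if_neg hkz, hpop, heq']
            push_cast; ring
          · rw [show (e :: rest).take (m' + 1) = e :: rest.take m' from rfl]
            exact (feas_congr (hpermfix (rest.take m'))).1 hfeas'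
          · rcases hbd' with h1 | h1
            · exact Or.inl (by simp [h1])
            · refine Or.inr ?_
              rw [show (e :: rest).take (m' + 1 + 1) = e :: rest.take (m' + 1) from rfl]
              intro hF
              exact h1 ((feas_congr (hpermfix (rest.take (m' + 1)))).2 hF)
    · -- no overflow: keep e
      have hcross' : ∀ a ∈ K ++ [e], ∀ b ∈ R, a ≤ b := by
        intro a ha b hb
        rcases List.mem_append.1 ha with h1 | h1
        · exact hcross a h1 b hb
        · simp at h1
          subst h1
          by_contra hbe
          have := hbig b hb
          rw [hsum] at hov
          omega
      have hKnn' : ∀ x ∈ K ++ [e], 0 ≤ x := by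
        intro x hx
        rcases List.mem_append.1 hx with h1 | h1
        · exact hK x h1
        · simp at h1; omega
      have hperm2' : (-e :: heap).Perm ((K ++ [e]).map (fun x => -x)) :=
        (List.Perm.cons _ hperm).trans (List.Perm.map _ (List.perm_append_singleton e K).symm)
      have hsum2' : sum_e + e = (K ++ [e]).sum := by rw [hsum]; simp
      have hbig2' : ∀ y ∈ R, n < (K ++ [e]).sum + y := by
        intro y hy
        have := hbig y hy
        rw [List.sum_append]
        simp
        linarith
      have hrec := ih (K ++ [e]) R (-e :: heap) (answer + 1) (sum_e + e) kleft
        hrest hKnn' hR hperm2' hsum2' hcross' (by omega) hbig2' hkl hRlen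
      obtain ⟨m', hle', heq', hfeas', hbd'⟩ := hrec
      have hbase : ((K ++ [e]) ++ R).Perm (e :: (K ++ R)) :=
        List.Perm.append_right R (List.perm_append_singleton e K)
      have hpermfix : ∀ tail : List Int,
          (((K ++ [e]) ++ R) ++ tail).Perm ((K ++ R) ++ (e :: tail)) := by
        intro tail
        exact (List.Perm.append_right tail hbase).trans
          (List.perm_middle (a := e) (l₁ := K ++ R) (l₂ := tail)).symm
      refine ⟨m' + 1, by simpa using hle', ?_, ?_, ?_⟩
      · rw [solutionGo_cons, if_neg hov, heq']
        push_cast; ring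
      · rw [show (e :: rest).take (m' + 1) = e :: rest.take m' from rfl]
        exact (feas_congr (hpermfix (rest.take m'))).1 hfeas'
      · rcases hbd' with h1 | h1
        · exact Or.inl (by simp [h1])
        · refine Or.inr ?_
          rw [show (e :: rest).take (m' + 1 + 1) = e :: rest.take (m' + 1) from rfl]
          intro hF
          exact h1 ((feas_congr (hpermfix (rest.take (m' + 1)))).2 hF)

lemma solution_char (n k : Int) (enemy : List Int) (hn : 0 ≤ n) (hk : 0 ≤ k)
    (he : ∀ e ∈ enemy, 0 ≤ e) :
    ∃ m : Nat, m ≤ enemy.length ∧ solution n k enemy = (m : Int) ∧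
      Feas n k (enemy.take m) ∧
      (m = enemy.length ∨ ¬ Feas n k (enemy.take (m + 1))) := by
  obtain ⟨m, h1, h2, h3, h4⟩ := go_char n k enemy [] [] [] 0 0 k
    he (by simp) (by simp) (by simp) (by simp) (by simp) hn (by simp) hk (by simp)
  refine ⟨m, h1, ?_, by simpa using h3, ?_⟩
  · unfold solution; rw [h2]; ring
  · rcases h4 with h | h
    · exact Or.inl h
    · exact Or.inr (by simpa using h)

-- monotonicity of feasibility (nonnegative waves): fewer rounds never need more soldiers
lemma sum_take_insertBy {e : Int} (he : 0 ≤ e) :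
    ∀ (s : List Int) (c : Nat), (∀ x ∈ s, 0 ≤ x) →
      (s.take c).sum ≤ ((PySem.List.insertBy (fun a b => decide (a < b)) e s).take (c + 1)).sum := by
  intro s
  induction s with
  | nil => intro c _; simpa [PySem.List.insertBy] using he
  | cons y ys ih =>
    intro c hnn
    by_cases hb : e < y
    · rw [show PySem.List.insertBy (fun a b => decide (a < b)) e (y :: ys) = e :: y :: ys from by
        simp [PySem.List.insertBy, hb]]
      rw [List.take_succ_cons, List.sum_cons]
      linarith [he]
    · rw [show PySem.List.insertBy (fun a b => decide (a < b)) e (y :: ys)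
            = y :: PySem.List.insertBy (fun a b => decide (a < b)) e ys from by
        simp [PySem.List.insertBy, hb]]
      cases c with
      | zero =>
        have hy : (0 : Int) ≤ y := hnn y (by simp)
        have hrest : 0 ≤ (List.take 0 ((PySem.List.insertBy (fun a b => decide (a < b)) e ys))).sum := by simp
        simpa using add_nonneg hy hrest
      | succ c' =>
        rw [List.take_succ_cons, List.take_succ_cons, List.sum_cons, List.sum_cons]
        have := ih c' (fun x hx => hnn x (by simp [hx]))
        linarith

lemma keepSum_append_singleton {k : Int} {xs : List Int} {e : Int}
    (hxs : ∀ x ∈ xs, 0 ≤ x) (he : 0 ≤ e) :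
    keepSum k xs ≤ keepSum k (xs ++ [e]) := by
  have hsort : ssort (xs ++ [e]) = PySem.List.insertBy (fun a b => decide (a < b)) e (ssort xs) := by
    unfold ssort
    rw [PySem.List.sorted_eq_foldl_insertBy, PySem.List.sorted_eq_foldl_insertBy, List.foldl_append]
    rfl
  unfold keepSum
  rw [hsort, List.length_append]
  by_cases hcase : k.toNat ≤ xs.length
  · rw [show xs.length + [e].length - k.toNat = (xs.length - k.toNat) + 1 by simp; omega]
    exact sum_take_insertBy he (ssort xs) _
      (fun x hx => hxs x ((PySem.List.mem_sorted xs _ false x).1 hx))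
  · rw [show xs.length - k.toNat = 0 by omega, show xs.length + [e].length - k.toNat = 0 by simp; omega]
    simp

lemma feas_mono (n k : Int) (enemy : List Int) (he : ∀ e ∈ enemy, 0 ≤ e) :
    ∀ (m m' : Nat), m ≤ m' → Feas n k (enemy.take m') → Feas n k (enemy.take m) := by
  have step : ∀ j : Nat, Feas n k (enemy.take (j + 1)) → Feas n k (enemy.take j) := by
    intro j hf
    by_cases hj : j < enemy.length
    · have e1 : enemy.take (j + 1) = enemy.take j ++ [enemy[j]] := by
        rw [List.take_add_one]; simp [List.getElem?_eq_getElem hj]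
      rw [e1] at hf
      exact le_trans (keepSum_append_singleton
        (fun x hx => he x (List.mem_of_mem_take hx)) (he _ (List.getElem_mem hj))) hf
    · rw [List.take_of_length_le (by omega)]
      rwa [List.take_of_length_le (by omega)] at hf
  intro m m' hle hf
  induction m' with
  | zero => rw [Nat.le_zero.mp hle]; exact hf
  | succ mm ih =>
    by_cases hm : m = mm + 1
    · rw [hm]; exact hf
    · exact ih (by omega) (step mm hf)

-- bridge: B's boolean feasibility test is the Feas predicate
lemma feasibleB_iff (n k : Int) (enemy : List Int) (m : Int)
    (h0 : 0 ≤ m) (hm : m ≤ (enemy.length : Int)) (hk : 0 ≤ k) :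
    feasibleB n k enemy m = true ↔ Feas n k (enemy.take m.toNat) := by
  have hmn : m.toNat ≤ enemy.length := by omega
  unfold feasibleB Feas keepSum ssort
  show (decide ((PySem.List.slice
      (PySem.List.sorted (PySem.List.slice enemy none (some m)) (fun x => x) false)
      none (some (max (m - k) 0))).sum ≤ n) = true) ↔ _
  rw [PySem.List.slice_to enemy h0]
  rw [PySem.List.slice_to _ (le_max_right (m - k) 0)]
  have hlen : (enemy.take m.toNat).length = m.toNat := by
    rw [List.length_take]; omega
  rw [hlen, show (max (m - k) 0).toNat = m.toNat - k.toNat by omega]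
  simp

lemma bsLoop_stop (n k : Int) (enemy : List Int) (lo hi : Int) (h : ¬ lo < hi) :
    bsLoop n k enemy lo hi = lo := by
  rw [bsLoop]; simp [h]

lemma bsLoop_step (n k : Int) (enemy : List Int) (lo hi : Int) (h : lo < hi) :
    bsLoop n k enemy lo hi =
      (if feasibleB n k enemy (PySem.Int.floordiv (lo + hi + 1) 2) then
        bsLoop n k enemy (PySem.Int.floordiv (lo + hi + 1) 2) hi
      else bsLoop n k enemy lo (PySem.Int.floordiv (lo + hi + 1) 2 - 1)) := by
  rw [bsLoop]; simp [h]

-- the binary search returns a feasibility boundary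
lemma bs_char (n k : Int) (enemy : List Int) :
    ∀ (N : Nat) (lo hi : Int), (hi - lo).toNat ≤ N → 0 ≤ lo → lo ≤ hi → hi ≤ (enemy.length : Int) →
      feasibleB n k enemy lo = true →
      (hi = (enemy.length : Int) ∨ feasibleB n k enemy (hi + 1) = false) →
      lo ≤ bsLoop n k enemy lo hi ∧ bsLoop n k enemy lo hi ≤ hi ∧
      feasibleB n k enemy (bsLoop n k enemy lo hi) = true ∧
      (bsLoop n k enemy lo hi = (enemy.length : Int) ∨
        feasibleB n k enemy (bsLoop n k enemy lo hi + 1) = false) := by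
  intro N
  induction N with
  | zero =>
    intro lo hi hN h0 hlh hhi hflo hrec
    have heq : lo = hi := by omega
    rw [bsLoop_stop n k enemy lo hi (by omega)]
    exact ⟨le_refl lo, hlh, hflo, heq ▸ hrec⟩
  | succ N' ih =>
    intro lo hi hN h0 hlh hhi hflo hrec
    by_cases hlt : lo < hi
    · rw [bsLoop_step n k enemy lo hi hlt]
      set mid := PySem.Int.floordiv (lo + hi + 1) 2 with hmid
      have hb : lo + 1 ≤ mid ∧ mid ≤ hi := by
        have h2 := PySem.Int.floordiv_two_mid_bounds (lo := lo + 1) (hi := hi) (by omega)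
        rw [show lo + 1 + hi = lo + hi + 1 from by ring] at h2
        exact ⟨h2.1, h2.2⟩
      by_cases hf : feasibleB n k enemy mid = true
      · rw [if_pos hf]
        obtain ⟨g1, g2, g3, g4⟩ := ih mid hi (by omega) (by omega) (by omega) hhi hf hrec
        exact ⟨by omega, g2, g3, g4⟩
      · rw [if_neg hf]
        obtain ⟨g1, g2, g3, g4⟩ := ih lo (mid - 1) (by omega) h0 (by omega) (by omega) hflo
          (Or.inr (by rw [show mid - 1 + 1 = mid from by ring]; exact Bool.not_eq_true _ ▸ (by simpa using hf)))
        exact ⟨g1, by omega, g3, g4⟩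
    · rw [bsLoop_stop n k enemy lo hi hlt]
      have heq : lo = hi := by omega
      exact ⟨le_refl lo, hlh, hflo, heq ▸ hrec⟩

-- with enough tokens every round is survived: A's loop never reaches the k == 0 break
lemma go_all (n : Int) :
    ∀ (es : List Int) (answer sum_e : Int) (heap : List Int) (kleft : Int),
      (es.length : Int) ≤ kleft →
      solutionGo n es answer sum_e heap kleft = answer + (es.length : Int) := by
  intro es
  induction es with
  | nil => intro answer sum_e heap kleft _; simp [solutionGo]
  | cons e rest ih =>
    intro answer sum_e heap kleft hk
    have hk1 : kleft ≠ 0 := by simp at hk; omega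
    rw [solutionGo_cons]
    by_cases hov : sum_e + e > n
    · rw [if_pos hov, if_neg hk1, ih _ _ _ _ (by simp at hk ⊢; omega)]
      simp; ring
    · rw [if_neg hov, ih _ _ _ _ (by simp at hk ⊢; omega)]
      simp; ring

-- and B's feasibility test always passes, so the binary search climbs to len(enemy)
lemma alt_all (n k : Int) (enemy : List Int) (hn : 0 ≤ n) (hk : (enemy.length : Int) ≤ k) :
    solution_alt n k enemy = (enemy.length : Int) := by
  have hfeas : ∀ m : Int, 0 ≤ m → m ≤ (enemy.length : Int) → feasibleB n k enemy m = true := by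
    intro m h0 hm
    show (decide ((PySem.List.slice
        (PySem.List.sorted (PySem.List.slice enemy none (some m)) (fun x => x) false)
        none (some (max (m - k) 0))).sum ≤ n) = true)
    rw [show max (m - k) 0 = 0 by omega, PySem.List.slice_to _ (le_refl (0 : Int))]
    simpa using hn
  obtain ⟨hr0, hrlen, _, hrbd⟩ := bs_char n k enemy enemy.length 0 (enemy.length : Int)
    (by omega) le_rfl (Int.natCast_nonneg enemy.length) le_rfl
    (hfeas 0 le_rfl (Int.natCast_nonneg enemy.length)) (Or.inl rfl)
  have halt : solution_alt n k enemy = bsLoop n k enemy 0 (enemy.length : Int) := by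
    unfold solution_alt; rw [PySem.List.len_eq]
  rw [halt]
  rcases hrbd with h | h
  · exact h
  · by_contra hne
    have : bsLoop n k enemy 0 (enemy.length : Int) + 1 ≤ (enemy.length : Int) := by omega
    rw [hfeas _ (by omega) this] at h
    exact Bool.true_eq_false.mp h

-- if no prefix of the waves ever exceeds n, A's loop never enters the overflow branch
lemma go_noflow (n : Int) :
    ∀ (es : List Int) (answer sum_e : Int) (heap : List Int) (kleft : Int),
      (∀ i ≤ es.length, sum_e + (es.take i).sum ≤ n) →
      solutionGo n es answer sum_e heap kleft = answer + (es.length : Int) := by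
  intro es
  induction es with
  | nil => intro answer sum_e heap kleft _; simp [solutionGo]
  | cons e rest ih =>
    intro answer sum_e heap kleft hp
    have h1 : sum_e + e ≤ n := by simpa using hp 1 (by simp)
    rw [solutionGo_cons, if_neg (by omega)]
    rw [ih (answer + 1) (sum_e + e) (-e :: heap) kleft (by
      intro i hi
      have := hp (i + 1) (by simpa using hi)
      simpa [add_assoc] using this)]
    simp; ring

lemma sum_nonpos_list (l : List Int) (h : ∀ x ∈ l, x ≤ 0) : l.sum ≤ 0 := by
  induction l with
  | nil => simp
  | cons x t ih =>
    simp only [List.sum_cons]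
    have h1 := h x (by simp)
    have h2 := ih (fun y hy => h y (by simp [hy]))
    omega

-- sums of the smallest elements never exceed a bound the whole list satisfies (n ≥ 0)
lemma sum_take_sorted_le {n : Int} (xs : List Int) (c : Nat)
    (hs : xs.sum ≤ n) (hn : 0 ≤ n) : ((ssort xs).take c).sum ≤ n := by
  set s := ssort xs with hsdef
  by_cases hpos : ∀ x ∈ s.take c, x ≤ 0
  · exact le_trans (sum_nonpos_list _ hpos) hn
  · push Not at hpos
    obtain ⟨x, hxmem, hxpos⟩ := hpos
    have hdrop : ∀ y ∈ s.drop c, 0 ≤ y := by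
      intro y hy
      have hpair : List.Pairwise (· ≤ ·) (s.take c ++ s.drop c) := by
        rw [List.take_append_drop]
        simpa using PySem.List.sorted_pairwise xs (fun x => x)
      have := (List.pairwise_append.1 hpair).2.2 x hxmem y hy
      omega
    have hsum : s.sum = xs.sum := (PySem.List.sorted_perm xs _ false).sum_eq
    have hsplit : (s.take c).sum + (s.drop c).sum = s.sum := by
      rw [← List.sum_append, List.take_append_drop]
    have := List.sum_nonneg hdrop
    omega

-- a binary search whose test always passes climbs to the upper end
lemma alt_of_all_feasible (n k : Int) (enemy : List Int)
    (hfeas : ∀ m : Int, 0 ≤ m → m ≤ (enemy.length : Int) → feasibleB n k enemy m = true) :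
    solution_alt n k enemy = (enemy.length : Int) := by
  obtain ⟨hr0, hrlen, _, hrbd⟩ := bs_char n k enemy enemy.length 0 (enemy.length : Int)
    (by omega) le_rfl (Int.natCast_nonneg enemy.length) le_rfl
    (hfeas 0 le_rfl (Int.natCast_nonneg enemy.length)) (Or.inl rfl)
  have halt : solution_alt n k enemy = bsLoop n k enemy 0 (enemy.length : Int) := by
    unfold solution_alt; rw [PySem.List.len_eq]
  rw [halt]
  rcases hrbd with h | h
  · exact h
  · by_contra hne
    have : bsLoop n k enemy 0 (enemy.length : Int) + 1 ≤ (enemy.length : Int) := by omega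
    rw [hfeas _ (by omega) this] at h
    exact Bool.true_eq_false.mp h

-- and one whose test always fails beyond lo stays at lo
lemma bsLoop_allfalse (n k : Int) (enemy : List Int) :
    ∀ (N : Nat) (lo hi : Int), (hi - lo).toNat ≤ N →
      (∀ m : Int, lo < m → m ≤ hi → feasibleB n k enemy m = false) →
      bsLoop n k enemy lo hi = lo := by
  intro N
  induction N with
  | zero =>
    intro lo hi hN _
    by_cases hlt : lo < hi
    · omega
    · exact bsLoop_stop n k enemy lo hi hlt
  | succ N' ih =>
    intro lo hi hN hall
    by_cases hlt : lo < hi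
    · rw [bsLoop_step n k enemy lo hi hlt]
      set mid := PySem.Int.floordiv (lo + hi + 1) 2 with hmid
      have hb : lo + 1 ≤ mid ∧ mid ≤ hi := by
        have h2 := PySem.Int.floordiv_two_mid_bounds (lo := lo + 1) (hi := hi) (by omega)
        rw [show lo + 1 + hi = lo + hi + 1 from by ring] at h2
        exact ⟨h2.1, h2.2⟩
      rw [if_neg (by rw [hall mid (by omega) (by omega)]; simp)]
      exact ih lo (mid - 1) (by omega) (fun m h1 h2 => hall m h1 (by omega))
    · exact bsLoop_stop n k enemy lo hi hlt

-- with no tokens and nonnegative waves, a negative soldier count survives no round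
lemma feasibleB_false_of_neg (n : Int) (enemy : List Int) (m : Int)
    (hn : n < 0) (he : ∀ e ∈ enemy, 0 ≤ e) (h1 : 1 ≤ m) (hm : m ≤ (enemy.length : Int)) :
    feasibleB n 0 enemy m = false := by
  show (decide ((PySem.List.slice
      (PySem.List.sorted (PySem.List.slice enemy none (some m)) (fun x => x) false)
      none (some (max (m - 0) 0))).sum ≤ n) = false)
  rw [PySem.List.slice_to enemy (by omega), PySem.List.slice_to _ (le_max_right (m - 0) 0)]
  have hwhole : List.take (max (m - 0) 0).toNat
      (PySem.List.sorted (List.take m.toNat enemy) (fun x => x) false)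
      = PySem.List.sorted (List.take m.toNat enemy) (fun x => x) false := by
    apply List.take_of_length_le
    rw [show (PySem.List.sorted (List.take m.toNat enemy) (fun x => x) false).length
        = (List.take m.toNat enemy).length from PySem.List.length_sorted _ _ false]
    rw [List.length_take]
    omega
  rw [hwhole]
  have hsum : (PySem.List.sorted (List.take m.toNat enemy) (fun x => x) false).sum
      = (List.take m.toNat enemy).sum := (PySem.List.sorted_perm _ _ false).sum_eq
  have hnn : 0 ≤ (List.take m.toNat enemy).sum :=
    List.sum_nonneg (fun x hx => he x (List.mem_of_mem_take hx))
  rw [hsum]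
  simp
  omega

-- ===== VERDICT (by name: the statement is the Claim_ definition above) =====
theorem solution_spec : Claim_equal_solution := by
  intro n k enemy _ hpre
  rcases hpre with ⟨hn, hk, he⟩ | ⟨hn, hk⟩ | hemp | ⟨hn, hpref⟩ | ⟨hk0, hn, he⟩
  case inr.inr.inr.inl =>
    -- no prefix ever needs more than n soldiers: both sides return len(enemy)
    show solution n k enemy = solution_alt n k enemy
    have hfeas : ∀ m : Int, 0 ≤ m → m ≤ (enemy.length : Int) → feasibleB n k enemy m = true := by
      intro m h0 hm
      show (decide ((PySem.List.slice
          (PySem.List.sorted (PySem.List.slice enemy none (some m)) (fun x => x) false)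
          none (some (max (m - k) 0))).sum ≤ n) = true)
      rw [PySem.List.slice_to enemy h0, PySem.List.slice_to _ (le_max_right (m - k) 0)]
      simp only [decide_eq_true_iff]
      exact sum_take_sorted_le (List.take m.toNat enemy) _ (hpref m.toNat (by omega)) hn
    rw [alt_of_all_feasible n k enemy hfeas]
    unfold solution
    rw [go_noflow n enemy 0 0 [] k (by simpa using hpref)]
    ring
  case inr.inr.inr.inr =>
    -- no tokens, negative soldier count, nonnegative waves: both sides return 0
    subst hk0
    show solution n 0 enemy = solution_alt n 0 enemy
    have halt : solution_alt n 0 enemy = 0 := by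
      unfold solution_alt
      rw [PySem.List.len_eq]
      exact bsLoop_allfalse n 0 enemy enemy.length 0 (enemy.length : Int) (by omega)
        (fun m h1 h2 => feasibleB_false_of_neg n enemy m hn he (by omega) h2)
    rw [halt]
    cases enemy with
    | nil => rfl
    | cons e rest =>
      show solutionGo n (e :: rest) 0 0 [] 0 = 0
      rw [solutionGo_cons, if_pos (by have := he e (by simp); omega), if_pos rfl]
  case inr.inr.inl =>
    -- no waves: both sides return 0
    subst hemp
    show solution n k [] = solution_alt n k []
    rw [show solution n k [] = 0 from rfl]
    unfold solution_alt
    rw [PySem.List.len_eq]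
    rw [bsLoop_stop n k [] 0 _ (by simp)]
  case inr.inl =>
    -- enough tokens for every round: both sides return len(enemy)
    show solution n k enemy = solution_alt n k enemy
    rw [alt_all n k enemy hn hk]
    unfold solution
    rw [go_all n enemy 0 0 [] k hk]
    ring
  unfold Spec_solution
  obtain ⟨m, hmle, hA, hFm, hbd⟩ := solution_char n k enemy hn hk he
  have hF0 : feasibleB n k enemy 0 = true := by
    rw [feasibleB_iff n k enemy 0 le_rfl (by exact_mod_cast Int.natCast_nonneg enemy.length) hk]
    show Feas n k (enemy.take (0 : Int).toNat)
    unfold Feas keepSum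
    simp
    exact hn
  have hbs := bs_char n k enemy enemy.length 0 (enemy.length : Int) (by omega) le_rfl
    (by exact_mod_cast Int.natCast_nonneg enemy.length) le_rfl hF0 (Or.inl rfl)
  set r := bsLoop n k enemy 0 (enemy.length : Int) with hr
  obtain ⟨hr0, hrlen, hFr, hrbd⟩ := hbs
  have halt : solution_alt n k enemy = r := by
    unfold solution_alt
    rw [PySem.List.len_eq]
  rw [hA, halt]
  -- both m and r are the (unique) feasibility boundary; conclude by monotonicity
  have hFr' : Feas n k (enemy.take r.toNat) :=
    (feasibleB_iff n k enemy r hr0 hrlen hk).1 hFr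
  by_cases hlt : (m : Int) < r
  · exfalso
    have hmne : m ≠ enemy.length := by omega
    have hnb : ¬ Feas n k (enemy.take (m + 1)) := hbd.resolve_left hmne
    exact hnb (feas_mono n k enemy he (m + 1) r.toNat (by omega) hFr')
  · by_cases hgt : r < (m : Int)
    · exfalso
      have hrne : r ≠ (enemy.length : Int) := by omega
      have hnb : feasibleB n k enemy (r + 1) = false := hrbd.resolve_left hrne
      have hnb' : ¬ Feas n k (enemy.take (r + 1).toNat) := by
        intro hF
        rw [(feasibleB_iff n k enemy (r + 1) (by omega) (by omega) hk).2 hF] at hnb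
        exact Bool.true_eq_false.mp hnb
      exact hnb' (feas_mono n k enemy he (r + 1).toNat m (by omega) hFm)
    · omega
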